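-- pv_equiv track=rewrite | github.com/ablova/Grupo-huntRED-Chatbot | app/com/chatbot/workflow/assessments/personality/personality.py | _analyze_disc
-- ===== SOURCE A (Python) =====
-- def _analyze_disc(responses: dict, business_unit: str = None) -> dict:
--     """Analiza las respuestas del DISC."""
--     scores = {
--         'dominante': 0,
--         'influencia': 0,
--         'estabilidad': 0,
--         'conformidad': 0
--     }
--
--     for option, count in responses.items():
--         if option == 'a':
--             scores['dominante'] += count
--         elif option == 'b':
--             scores['influencia'] += count
--         elif option == 'c':
--             scores['estabilidad'] += count
--         elif option == 'd':
--             scores['conformidad'] += count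
--
--     return scores
-- ===== SOURCE B (Python) =====
-- def _analyze_disc(responses: dict, business_unit: str = None) -> dict:
--     """Analiza las respuestas del DISC."""
--     mapping = {'a': 'dominante', 'b': 'influencia', 'c': 'estabilidad', 'd': 'conformidad'}
--     return {category: responses.get(option, 0) for option, category in mapping.items()}
-- ===== Notes on version B (the rewrite author's own statement) =====
-- stated objective: simpler
-- what changed: Instead of scanning the responses dict and branching per option letter into zero-initialized buckets, B walks a fixed letter-to-category mapping and reads each letter's count directly with responses.get(letter, 0).
import Mathlib
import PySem

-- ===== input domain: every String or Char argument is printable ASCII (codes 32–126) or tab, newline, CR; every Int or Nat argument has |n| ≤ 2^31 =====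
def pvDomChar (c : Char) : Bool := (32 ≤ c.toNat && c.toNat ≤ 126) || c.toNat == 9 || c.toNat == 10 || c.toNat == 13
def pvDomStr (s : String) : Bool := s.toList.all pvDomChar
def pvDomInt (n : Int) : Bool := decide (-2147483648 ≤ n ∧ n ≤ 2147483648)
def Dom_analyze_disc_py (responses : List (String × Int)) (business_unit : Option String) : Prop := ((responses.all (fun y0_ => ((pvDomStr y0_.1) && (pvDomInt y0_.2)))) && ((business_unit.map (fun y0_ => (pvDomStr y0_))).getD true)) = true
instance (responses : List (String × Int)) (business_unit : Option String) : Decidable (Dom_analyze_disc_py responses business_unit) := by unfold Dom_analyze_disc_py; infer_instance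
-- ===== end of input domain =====

-- B replaces A's scan-and-branch loop over the responses by a walk over a fixed
-- letter→category mapping with a direct responses.get(letter, 0) lookup per category (objective: simpler).

-- ===== PORT A =====
-- loop body of A's 'for option, count in responses.items()'
def stepA (scores : PySem.Dict String Int) (p : String × Int) : PySem.Dict String Int :=
  if p.1 == "a" then scores.modify "dominante" 0 (· + p.2)
  else if p.1 == "b" then scores.modify "influencia" 0 (· + p.2)
  else if p.1 == "c" then scores.modify "estabilidad" 0 (· + p.2)
  else if p.1 == "d" then scores.modify "conformidad" 0 (· + p.2)
  else scores

def analyze_disc_py (responses : List (String × Int)) (_business_unit : Option String) : List (String × Int) :=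
  let scores : PySem.Dict String Int :=
    PySem.Dict.mk [("dominante", 0), ("influencia", 0), ("estabilidad", 0), ("conformidad", 0)]
  (responses.foldl stepA scores).items

-- ===== PORT B =====
def analyze_disc_py_alt (responses : List (String × Int)) (_business_unit : Option String) : List (String × Int) :=
  let mapping : List (String × String) :=
    [("a", "dominante"), ("b", "influencia"), ("c", "estabilidad"), ("d", "conformidad")]
  mapping.map (fun oc => (oc.2, PySem.Dict.getD (PySem.Dict.mk responses) oc.1 0))

-- ===== PRECONDITION & SPEC =====
-- Pre_ excludes association lists with duplicate keys: a Python dict cannot hold them, so such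
-- lists do not represent any input the Python function is ever called with, and the two ports'
-- readings of a duplicated key (sum of all occurrences vs first occurrence) are both accidental.
def Pre_analyze_disc_py (responses : List (String × Int)) (_business_unit : Option String) : Prop :=
  (responses.map Prod.fst).Nodup
instance (responses : List (String × Int)) (business_unit : Option String) : Decidable (Pre_analyze_disc_py responses business_unit) := by unfold Pre_analyze_disc_py; infer_instance

def pvWitness_analyze_disc_py : (List (String × Int)) × Option String := ([("a", 2), ("c", 1), ("x", 7)], none)

def Spec_analyze_disc_py (responses : List (String × Int)) (business_unit : Option String) (out : List (String × Int)) : Prop := out = analyze_disc_py_alt responses business_unit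
instance (responses : List (String × Int)) (business_unit : Option String) (out : List (String × Int)) : Decidable (Spec_analyze_disc_py responses business_unit out) := by unfold Spec_analyze_disc_py; infer_instance

-- ===== CLAIM (what is proved, stated in full; the proofs are below) =====
def Claim_equal_analyze_disc_py : Prop := ∀ (responses : List (String × Int)) (business_unit : Option String), Dom_analyze_disc_py responses business_unit → Pre_analyze_disc_py responses business_unit → Spec_analyze_disc_py responses business_unit (analyze_disc_py responses business_unit)

-- ===== LEMMAS AND PROOFS =====

-- total count A accumulates for one option letter
def keySum (k : String) (l : List (String × Int)) : Int :=
  ((l.filter (fun p => p.1 == k)).map Prod.snd).sum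

theorem loopA (l : List (String × Int)) (d i s c : Int) :
    l.foldl stepA (PySem.Dict.mk [("dominante", d), ("influencia", i), ("estabilidad", s), ("conformidad", c)]) =
    PySem.Dict.mk [("dominante", d + keySum "a" l), ("influencia", i + keySum "b" l),
      ("estabilidad", s + keySum "c" l), ("conformidad", c + keySum "d" l)] := by
  induction l generalizing d i s c with
  | nil => simp [keySum]
  | cons p t ih =>
    obtain ⟨k, v⟩ := p
    simp only [List.foldl_cons, stepA]
    by_cases h1 : k = "a"
    · subst h1
      simp [PySem.Dict.modify, PySem.Dict.insert, PySem.Dict.getD, PySem.Dict.get?,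
        PySem.Dict.contains, ih, keySum, add_assoc]
    · by_cases h2 : k = "b"
      · subst h2
        simp [PySem.Dict.modify, PySem.Dict.insert, PySem.Dict.getD, PySem.Dict.get?,
          PySem.Dict.contains, ih, keySum, add_assoc]
      · by_cases h3 : k = "c"
        · subst h3
          simp [PySem.Dict.modify, PySem.Dict.insert, PySem.Dict.getD, PySem.Dict.get?,
            PySem.Dict.contains, ih, keySum, add_assoc]
        · by_cases h4 : k = "d"
          · subst h4
            simp [PySem.Dict.modify, PySem.Dict.insert, PySem.Dict.getD, PySem.Dict.get?,
              PySem.Dict.contains, ih, keySum, add_assoc]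
          · simp [h1, h2, h3, h4, ih, keySum]

theorem keySum_of_not_mem (l : List (String × Int)) (k : String)
    (h : k ∉ l.map Prod.fst) : keySum k l = 0 := by
  unfold keySum
  have : l.filter (fun p => p.1 == k) = [] := by
    apply List.filter_eq_nil_iff.mpr
    intro p hp hbeq
    exact h (List.mem_map.mpr ⟨p, hp, beq_iff_eq.mp hbeq⟩)
  simp [this]

-- with nodup keys, A's accumulated sum for a letter is B's first-match lookup
theorem keySum_eq_getD (l : List (String × Int)) (k : String)
    (h : (l.map Prod.fst).Nodup) : keySum k l = PySem.Dict.getD (PySem.Dict.mk l) k 0 := by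
  induction l with
  | nil => simp [keySum, PySem.Dict.getD, PySem.Dict.get?]
  | cons p t ih =>
    obtain ⟨k', v⟩ := p
    simp only [List.map_cons, List.nodup_cons] at h
    by_cases hk : k' = k
    · subst hk
      have : keySum k' t = 0 := keySum_of_not_mem t k' h.1
      simp [keySum, PySem.Dict.getD, PySem.Dict.get?_mk_cons] at this ⊢
      simpa [keySum] using this
    · have := ih h.2
      simp [keySum, PySem.Dict.getD, PySem.Dict.get?_mk_cons, hk] at this ⊢
      simpa [keySum, hk] using this

-- ===== VERDICT (by name: the statement is the Claim_ definition above) =====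
theorem analyze_disc_py_spec : Claim_equal_analyze_disc_py := by
  intro responses business_unit _ hpre
  unfold Spec_analyze_disc_py analyze_disc_py analyze_disc_py_alt
  simp only []
  rw [loopA]
  simp [keySum_eq_getD _ _ hpre]
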